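-- pv_equiv track=rewrite | github.com/Maridan8/Crypto-Price-Prediction | Features/utils/sum_in_period.py | sum_in_period_negative
-- ===== SOURCE A (Python) =====
-- def sum_in_period_negative(l, period):
--     sums = [0] * len(l)
--     for i in range(period+1, len(l)):
--         sum = 0
--         for j in range(i-period, i):
--             if ((l[j] - l[j-1]) < 0) :
--                 sum += abs(l[j] - l[j-1])
--         sums[i] = sum
--
--     return sums
-- ===== SOURCE B (Python) =====
-- def sum_in_period_negative(l, period):
--     n = len(l)
--     sums = [0] * n
--     if period <= 0:
--         return sums
--     # prefix sums of the negative-difference array: pref[k] = sum of max(0, l[j-1]-l[j]) for j in 1..k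
--     pref = [0]
--     for j in range(1, n):
--         pref.append(pref[-1] + max(0, l[j - 1] - l[j]))
--     for i in range(period + 1, n):
--         sums[i] = pref[i - 1] - pref[i - period - 1]
--     return sums
-- ===== Notes on version B (the rewrite author's own statement) =====
-- stated objective: faster
-- what changed: Replaces the O(n*period) rescan of each window by a precomputed prefix-sum array of the negative differences, so every window sum is one subtraction.
import Mathlib
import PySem

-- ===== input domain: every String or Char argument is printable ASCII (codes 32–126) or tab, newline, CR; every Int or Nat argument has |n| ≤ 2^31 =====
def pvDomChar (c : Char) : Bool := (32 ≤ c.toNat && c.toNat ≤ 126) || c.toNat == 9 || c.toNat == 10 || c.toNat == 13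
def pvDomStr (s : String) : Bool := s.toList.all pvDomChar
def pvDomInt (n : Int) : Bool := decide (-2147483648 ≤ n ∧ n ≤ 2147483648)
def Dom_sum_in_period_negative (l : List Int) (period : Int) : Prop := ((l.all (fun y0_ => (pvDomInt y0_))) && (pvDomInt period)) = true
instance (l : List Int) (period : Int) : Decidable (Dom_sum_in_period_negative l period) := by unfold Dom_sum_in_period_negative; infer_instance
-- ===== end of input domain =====

-- B replaces A's per-window rescan by prefix sums of the negative-difference array,
-- one subtraction per window (objective: faster).

-- ===== PORT A =====
def sum_in_period_negative (l : List Int) (period : Int) : List Int :=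
  (PySem.List.pyRange (period + 1) l.length 1).foldl
    (fun sums i =>
      PySem.List.pySetD sums i
        ((PySem.List.pyRange (i - period) i 1).foldl
          (fun sum j =>
            if PySem.List.pyGetD l j 0 - PySem.List.pyGetD l (j - 1) 0 < 0 then
              sum + |PySem.List.pyGetD l j 0 - PySem.List.pyGetD l (j - 1) 0|
            else sum) 0))
    (List.replicate l.length 0)

-- ===== PORT B =====
def sum_in_period_negative_alt (l : List Int) (period : Int) : List Int :=
  let n : Int := l.length
  let sums : List Int := List.replicate l.length 0
  if period ≤ 0 then sums
  else
    let pref := (PySem.List.pyRange 1 n 1).foldl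
      (fun pref j =>
        pref ++ [PySem.List.pyGetD pref (-1) 0 +
                 max 0 (PySem.List.pyGetD l (j - 1) 0 - PySem.List.pyGetD l j 0)]) [0]
    (PySem.List.pyRange (period + 1) n 1).foldl
      (fun sums i =>
        PySem.List.pySetD sums i
          (PySem.List.pyGetD pref (i - 1) 0 - PySem.List.pyGetD pref (i - period - 1) 0))
      sums

-- ===== PRECONDITION & SPEC =====
-- Pre_ excludes exactly the inputs where A raises IndexError: period < -len(l)-1 makes the
-- first loop iteration assign sums[period+1] with an index below -len(l).
def Pre_sum_in_period_negative (l : List Int) (period : Int) : Prop :=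
  -(l.length : Int) - 1 ≤ period
instance (l : List Int) (period : Int) : Decidable (Pre_sum_in_period_negative l period) := by
  unfold Pre_sum_in_period_negative; infer_instance
def pvWitness_sum_in_period_negative : List Int × Int := ([5, 3, 7, 1, 2, 8], 2)

def Spec_sum_in_period_negative (l : List Int) (period : Int) (out : List Int) : Prop :=
  out = sum_in_period_negative_alt l period
instance (l : List Int) (period : Int) (out : List Int) : Decidable (Spec_sum_in_period_negative l period out) := by
  unfold Spec_sum_in_period_negative; infer_instance

-- ===== CLAIM (what is proved, stated in full; the proofs are below) =====
def Claim_equal_sum_in_period_negative : Prop := ∀ (l : List Int) (period : Int), Dom_sum_in_period_negative l period → Pre_sum_in_period_negative l period → Spec_sum_in_period_negative l period (sum_in_period_negative l period)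

-- ===== LEMMAS AND PROOFS =====

-- the negative-consecutive-difference at position j, and its prefix sums
def pvNegDiff (l : List Int) (j : Int) : Int :=
  max 0 (PySem.List.pyGetD l (j - 1) 0 - PySem.List.pyGetD l j 0)

def pvPref (l : List Int) : Nat → Int
  | 0 => 0
  | k + 1 => pvPref l k + pvNegDiff l ((k : Int) + 1)

-- A's inner loop is the sum of pvNegDiff over the window
lemma pv_inner_sum (l : List Int) (a b : Int) :
    ((PySem.List.pyRange a b 1).foldl
        (fun sum j =>
          if PySem.List.pyGetD l j 0 - PySem.List.pyGetD l (j - 1) 0 < 0 then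
            sum + |PySem.List.pyGetD l j 0 - PySem.List.pyGetD l (j - 1) 0|
          else sum) 0) =
      ((PySem.List.pyRange a b 1).map (pvNegDiff l)).sum := by
  rw [PySem.List.foldl_congr_mem (PySem.List.pyRange a b 1)
      (fun sum j =>
        if PySem.List.pyGetD l j 0 - PySem.List.pyGetD l (j - 1) 0 < 0 then
          sum + |PySem.List.pyGetD l j 0 - PySem.List.pyGetD l (j - 1) 0|
        else sum)
      (fun sum j => sum + pvNegDiff l j) 0
      (by
        intro acc j _
        dsimp only
        unfold pvNegDiff
        split_ifs with h
        · rw [abs_of_neg h]; omega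
        · omega)]
  rw [PySem.List.foldl_add]
  simp

-- sum of pvNegDiff over a window is a difference of prefix sums
lemma pv_sum_window (l : List Int) (a : Int) (ha : 1 ≤ a) :
    ∀ (m : Nat), ((PySem.List.pyRange a (a + m) 1).map (pvNegDiff l)).sum =
      pvPref l (a + m - 1).toNat - pvPref l (a - 1).toNat := by
  intro m
  induction m with
  | zero => simp
  | succ m ih =>
    have h1 : a + ((m : Nat) + 1 : Nat) = (a + m) + 1 := by push_cast; ring
    rw [h1, PySem.List.pyRange_one_succ_right (by omega), List.map_append, List.sum_append, ih]
    have h2 : (a + m + 1 - 1).toNat = (a + m - 1).toNat + 1 := by omega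
    rw [h2]
    show _ = pvPref l (a + m - 1).toNat + pvNegDiff l (((a + m - 1).toNat : Int) + 1)
        - pvPref l (a - 1).toNat
    have h3 : (((a + m - 1).toNat : Int) + 1) = a + m := by omega
    rw [h3]; simp; ring

-- B's prefix loop builds the list of all prefix sums
lemma pv_pref_spec (l : List Int) :
    ∀ (m : Nat), 1 ≤ m →
      ((PySem.List.pyRange 1 (m : Int) 1).foldl
        (fun pref j =>
          pref ++ [PySem.List.pyGetD pref (-1) 0 +
                   max 0 (PySem.List.pyGetD l (j - 1) 0 - PySem.List.pyGetD l j 0)]) [0]) =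
      (List.range m).map (pvPref l) := by
  intro m
  induction m with
  | zero => omega
  | succ m ih =>
    intro _
    by_cases hm : 1 ≤ m
    · have hcast : (((m : Nat) + 1 : Nat) : Int) = ((m : Int) + 1 : Int) := by push_cast; ring
      rw [hcast, PySem.List.pyRange_one_succ_right (by omega), List.foldl_append, ih hm]
      simp only [List.foldl_cons, List.foldl_nil]
      have hsplit : List.range m = List.range (m - 1) ++ [m - 1] := by
        conv_lhs => rw [show m = (m - 1) + 1 by omega, List.range_succ]
      have hlast : PySem.List.pyGetD ((List.range m).map (pvPref l)) (-1) 0 = pvPref l (m - 1) := by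
        rw [hsplit, List.map_append, List.map_cons, List.map_nil,
          PySem.List.pyGetD_neg_one_append_singleton]
      rw [hlast, List.range_succ, List.map_append, List.map_cons, List.map_nil]
      congr 1
      show [pvPref l (m - 1) + pvNegDiff l (m : Int)] = [pvPref l m]
      congr 1
      conv_rhs => rw [show m = (m - 1) + 1 by omega]
      show _ = pvPref l (m - 1) + pvNegDiff l (((m - 1 : Nat) : Int) + 1)
      congr 2
      omega
    · have hm0 : m = 0 := by omega
      subst hm0
      rw [show ((1 : Nat) : Int) = (1 : Int) by norm_num,
        PySem.List.pyRange_one_eq_nil (by norm_num : (1:Int) ≤ 1)]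
      rfl

-- element characterization of the loop writing g i at every index of a range
lemma pv_foldl_pySetD_getElem (g : Int → Int) (b : Int) :
    ∀ (fuel : Nat) (a : Int) (init : List Int), (b - a).toNat ≤ fuel → 0 ≤ a →
      b ≤ (init.length : Int) → ∀ (k : Nat), k < init.length →
      ((PySem.List.pyRange a b 1).foldl (fun s i => PySem.List.pySetD s i (g i)) init)[k]? =
        if a ≤ (k : Int) ∧ (k : Int) < b then some (g k) else init[k]? := by
  intro fuel
  induction fuel with
  | zero =>
    intro a init hfuel ha hb k hk
    rw [PySem.List.pyRange_one_eq_nil (by omega)]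
    simp only [List.foldl_nil]
    rw [if_neg (by omega)]
  | succ fuel ih =>
    intro a init hfuel ha hb k hk
    by_cases hab : b ≤ a
    · rw [PySem.List.pyRange_one_eq_nil hab]
      simp only [List.foldl_nil]
      rw [if_neg (by omega)]
    · rw [PySem.List.pyRange_one_cons (by omega)]
      simp only [List.foldl_cons]
      have hlen : (PySem.List.pySetD init a (g a)).length = init.length :=
        PySem.List.length_pySetD ..
      rw [ih (a + 1) (PySem.List.pySetD init a (g a)) (by omega) (by omega) (by omega) k
        (by omega)]
      rw [PySem.List.pySetD_of_nonneg init (g a) ha, List.getElem?_set]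
      split_ifs <;> first | rfl | omega | (congr 2; omega)

-- length is preserved by the write loop
lemma pv_length_foldl_pySetD (g : Int → Int) (r : List Int) :
    ∀ (init : List Int),
      (r.foldl (fun s i => PySem.List.pySetD s i (g i)) init).length = init.length := by
  induction r with
  | nil => intro init; rfl
  | cons x r ih =>
    intro init
    simp only [List.foldl_cons]
    rw [ih, PySem.List.length_pySetD]

-- writing 0 anywhere into an all-zero list keeps it all-zero
lemma pv_pySetD_replicate_zero (n : Nat) (i : Int) :
    PySem.List.pySetD (List.replicate n (0 : Int)) i 0 = List.replicate n 0 := by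
  unfold PySem.List.pySetD PySem.List.pySet?
  cases h : PySem.List.pyIdx? (List.replicate n (0 : Int)).length i <;>
    simp [List.set_replicate_self]

lemma pv_foldl_zero_writes (n : Nat) (r : List Int) :
    r.foldl (fun s i => PySem.List.pySetD s i (0 : Int)) (List.replicate n 0) =
      List.replicate n 0 := by
  induction r with
  | nil => rfl
  | cons x r ih => simp only [List.foldl_cons, pv_pySetD_replicate_zero, ih]

-- ===== VERDICT (by name: the statement is the Claim_ definition above) =====
theorem sum_in_period_negative_spec : Claim_equal_sum_in_period_negative := by
  intro l period _ _
  unfold Spec_sum_in_period_negative sum_in_period_negative sum_in_period_negative_alt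
  by_cases hp : period ≤ 0
  · -- every window is empty: A writes only zeros, B returns the zero list
    rw [if_pos hp]
    rw [PySem.List.foldl_congr_mem (PySem.List.pyRange (period + 1) l.length 1)
        (fun sums i =>
          PySem.List.pySetD sums i
            ((PySem.List.pyRange (i - period) i 1).foldl
              (fun sum j =>
                if PySem.List.pyGetD l j 0 - PySem.List.pyGetD l (j - 1) 0 < 0 then
                  sum + |PySem.List.pyGetD l j 0 - PySem.List.pyGetD l (j - 1) 0|
                else sum) 0))
        (fun sums i => PySem.List.pySetD sums i 0)
        (List.replicate l.length 0)
        (by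
          intro acc i _
          dsimp only
          rw [PySem.List.pyRange_one_eq_nil (by omega : i ≤ i - period)]
          rfl)]
    exact pv_foldl_zero_writes l.length _
  · rw [if_neg hp]
    by_cases hn : (l.length : Int) ≤ period + 1
    · rw [PySem.List.pyRange_one_eq_nil hn]
      rfl
    · dsimp only
      rw [pv_pref_spec l l.length (by omega)]
      apply List.ext_getElem?
      intro k
      by_cases hk : k < l.length
      · rw [pv_foldl_pySetD_getElem
            (fun i =>
              (PySem.List.pyRange (i - period) i 1).foldl
                (fun sum j =>
                  if PySem.List.pyGetD l j 0 - PySem.List.pyGetD l (j - 1) 0 < 0 then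
                    sum + |PySem.List.pyGetD l j 0 - PySem.List.pyGetD l (j - 1) 0|
                  else sum) 0)
            (l.length : Int) l.length (period + 1) (List.replicate l.length 0)
            (by omega) (by omega) (by simp) k (by simpa using hk),
          pv_foldl_pySetD_getElem
            (fun i =>
              PySem.List.pyGetD ((List.range l.length).map (pvPref l)) (i - 1) 0 -
                PySem.List.pyGetD ((List.range l.length).map (pvPref l)) (i - period - 1) 0)
            (l.length : Int) l.length (period + 1) (List.replicate l.length 0)
            (by omega) (by omega) (by simp) k (by simpa using hk)]
        by_cases hcond : period + 1 ≤ (k : Int) ∧ (k : Int) < (l.length : Int)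
        · rw [if_pos hcond, if_pos hcond]
          congr 1
          -- A's window sum at index k = B's prefix-sum difference at index k
          rw [pv_inner_sum]
          rw [show PySem.List.pyRange ((k : Int) - period) (k : Int) 1 =
                PySem.List.pyRange ((k : Int) - period)
                  (((k : Int) - period) + ((period.toNat : Nat) : Int)) 1 by
              congr 1; omega]
          rw [pv_sum_window l ((k : Int) - period) (by omega) period.toNat]
          rw [PySem.List.pyGetD_eq_getElem _ 0 (by omega) (by simp; omega),
            PySem.List.pyGetD_eq_getElem _ 0 (by omega) (by simp; omega)]
          simp only [List.getElem_map, List.getElem_range]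
          congr 2
          omega
        · rw [if_neg hcond, if_neg hcond]
      · have hA := pv_length_foldl_pySetD
          (fun i =>
            (PySem.List.pyRange (i - period) i 1).foldl
              (fun sum j =>
                if PySem.List.pyGetD l j 0 - PySem.List.pyGetD l (j - 1) 0 < 0 then
                  sum + |PySem.List.pyGetD l j 0 - PySem.List.pyGetD l (j - 1) 0|
                else sum) 0)
          (PySem.List.pyRange (period + 1) l.length 1) (List.replicate l.length 0)
        have hB := pv_length_foldl_pySetD
          (fun i =>
            PySem.List.pyGetD ((List.range l.length).map (pvPref l)) (i - 1) 0 -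
              PySem.List.pyGetD ((List.range l.length).map (pvPref l)) (i - period - 1) 0)
          (PySem.List.pyRange (period + 1) l.length 1) (List.replicate l.length 0)
        rw [List.getElem?_eq_none (by rw [hA]; simpa using hk),
          List.getElem?_eq_none (by rw [hB]; simpa using hk)]
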